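-- pv_equiv track=rewrite | github.com/ALAZAR-ADDIS/leetcode | 2469-longest-subsequence-with-limited-sum/longest-subsequence-with-limited-sum.py | answerQueries
-- ===== SOURCE A (Python) =====
-- from typing import List
--
-- def answerQueries(nums: List[int], queries: List[int]) -> List[int]:
--     ans=[]
--     nums.sort()
--     for i in range(len(queries)):
--         l=0
--         total=0
--         maxWind=0
--         for r in range(len(nums)):
--             total+=nums[r]
--             while total>queries[i]:
--                 total-=nums[l]
--                 l+=1
--             maxWind=max(maxWind,r-l+1)
--         ans.append(maxWind)
--     return ans
-- ===== SOURCE B (Python) =====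
-- import bisect
--
-- def answerQueries(nums, queries):
--     # Sort once, take prefix sums; the prefix-sum list of a sorted array is
--     # decreasing over the negative entries and non-decreasing afterwards, so the
--     # longest prefix with sum <= q is found by one binary search in the
--     # non-decreasing part (starting at m = number of negative entries).
--     nums.sort()
--     prefix = [0]
--     for x in nums:
--         prefix.append(prefix[-1] + x)
--     m = bisect.bisect_left(nums, 0)
--     inc = prefix[m:]
--     res = []
--     for q in queries:
--         if inc[0] > q:
--             res.append(0)
--         else:
--             res.append(m + bisect.bisect_right(inc, q) - 1)
--     return res
-- ===== Notes on version B (the rewrite author's own statement) =====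
-- stated objective: faster
-- what changed: Replaces the per-query O(n) sliding-window scan with prefix sums of the sorted array plus one binary search per query (splitting at the count of negative entries so the searched prefix-sum segment is non-decreasing).
import Mathlib
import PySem

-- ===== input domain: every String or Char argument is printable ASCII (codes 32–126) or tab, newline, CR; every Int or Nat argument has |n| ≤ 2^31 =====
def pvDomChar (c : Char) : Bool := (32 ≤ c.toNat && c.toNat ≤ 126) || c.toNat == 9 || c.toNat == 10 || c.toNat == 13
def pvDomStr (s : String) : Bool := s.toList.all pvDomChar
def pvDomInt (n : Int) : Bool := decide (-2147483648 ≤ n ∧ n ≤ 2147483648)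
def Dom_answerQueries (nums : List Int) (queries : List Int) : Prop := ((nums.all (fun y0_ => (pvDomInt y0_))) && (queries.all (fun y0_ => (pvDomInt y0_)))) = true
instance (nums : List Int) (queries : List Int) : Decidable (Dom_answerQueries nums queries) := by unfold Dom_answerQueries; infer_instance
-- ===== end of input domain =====

-- B replaces A's per-query sliding-window scan by prefix sums of the sorted list plus one
-- binary search per query (objective: faster). Both Pythons sort `nums` in place; the
-- equivalence proved here is about the return value (the mutation is identical).

-- ===== PORT A =====
-- `while total > queries[i]: total -= nums[l]; l += 1` — fuel-bounded recursion; the fuel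
-- (length+1) always suffices, and the `none` branch is Python's IndexError (excluded by Pre_).
def pvWhileA (s : List Int) (q : Int) : Nat → Int → Nat → Int × Nat
  | 0, total, l => (total, l)
  | fuel+1, total, l =>
    if q < total then
      match PySem.List.pyGet? s (l : Int) with
      | some v => pvWhileA s q fuel (total - v) (l + 1)
      | none => (total, l)
    else (total, l)

-- body of `for r in range(len(nums))` with state (l, total, maxWind)
def pvStepA (s : List Int) (q : Int) (st : Nat × Int × Int) (r : Int) : Nat × Int × Int :=
  let t1 := st.2.1 + PySem.List.pyGetD s r 0
  let p := pvWhileA s q (s.length + 1) t1 st.1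
  (p.2, p.1, max st.2.2 (r - (p.2 : Int) + 1))

def pvInnerA (s : List Int) (q : Int) : Int :=
  ((PySem.List.pyRange 0 (s.length : Int) 1).foldl (pvStepA s q) (0, 0, 0)).2.2

def answerQueries (nums : List Int) (queries : List Int) : List Int :=
  let s := PySem.List.sorted nums (fun x => x)
  (PySem.List.pyRange 0 (queries.length : Int) 1).foldl
    (fun ans i => ans ++ [pvInnerA s (PySem.List.pyGetD queries i 0)]) []

-- ===== PORT B =====
-- prefix = [0]; for x in nums: prefix.append(prefix[-1] + x)
def pvPrefixB (s : List Int) : List Int :=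
  s.foldl (fun p x => p ++ [PySem.List.pyGetD p (-1) 0 + x]) [(0 : Int)]

-- loop body over queries; `inc[0]` is pyGet? (inc is never empty, so the none arm is dead)
def pvQueryB (m : Nat) (inc : List Int) (res : List Int) (q : Int) : List Int :=
  match PySem.List.pyGet? inc 0 with
  | some h => if q < h then res ++ [(0 : Int)]
              else res ++ [(m : Int) + (PySem.List.bisectRight inc q : Int) - 1]
  | none => res ++ [(0 : Int)]

def answerQueries_alt (nums : List Int) (queries : List Int) : List Int :=
  let s := PySem.List.sorted nums (fun x => x)
  let pre := pvPrefixB s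
  let m := PySem.List.bisectLeft s 0
  let inc := PySem.List.slice pre (some (m : Int)) none
  queries.foldl (pvQueryB m inc) []

-- ===== PRECONDITION & SPEC =====
-- Pre_ excludes exactly the inputs on which A raises IndexError: a query smaller than
-- min(0, every nonempty prefix sum of the sorted list) runs A's left pointer off the end.
def Pre_answerQueries (nums : List Int) (queries : List Int) : Prop :=
  ∀ q ∈ queries, 0 ≤ q ∨
    ∀ k < nums.length, ((PySem.List.sorted nums (fun x => x)).take (k+1)).sum ≤ q
instance (nums : List Int) (queries : List Int) : Decidable (Pre_answerQueries nums queries) := by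
  unfold Pre_answerQueries; infer_instance

def pvWitness_answerQueries : List Int × List Int := ([2, -1, 3], [3])

def Spec_answerQueries (nums : List Int) (queries : List Int) (out : List Int) : Prop :=
  out = answerQueries_alt nums queries
instance (nums : List Int) (queries : List Int) (out : List Int) : Decidable (Spec_answerQueries nums queries out) := by
  unfold Spec_answerQueries; infer_instance

-- ===== CLAIM (what is proved, stated in full; the proofs are below) =====
def Claim_equal_answerQueries : Prop := ∀ (nums : List Int) (queries : List Int), Dom_answerQueries nums queries → Pre_answerQueries nums queries → Spec_answerQueries nums queries (answerQueries nums queries)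
-- ===== LEMMAS AND PROOFS =====

-- K s q: the longest k with (sum of the k smallest elements) ≤ q — the common value of both programs
def pvK (s : List Int) (q : Int) : Nat :=
  Nat.findGreatest (fun k => (s.take k).sum ≤ q) s.length

-- prefix sums are monotone over a stretch of nonnegative entries
lemma pvMono (s : List Int) (a b : Nat) (hab : a ≤ b) (hb : b ≤ s.length)
    (hpos : ∀ i (_ : i < s.length), a ≤ i → i < b → 0 ≤ s[i]) :
    (s.take a).sum ≤ (s.take b).sum := by
  induction b, hab using Nat.le_induction with
  | base => exact le_rfl
  | succ b hab ih =>
    have hb' : b < s.length := by omega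
    rw [List.sum_take_succ s b hb']
    have h0 : 0 ≤ s[b] := hpos b hb' hab (by omega)
    have hih := ih (by omega) (fun i hi hai hib => hpos i hi hai (by omega))
    omega

-- prefix sums are antitone over a stretch of nonpositive entries
lemma pvAnti (s : List Int) (a b : Nat) (hab : a ≤ b) (hb : b ≤ s.length)
    (hneg : ∀ i (_ : i < s.length), a ≤ i → i < b → s[i] ≤ 0) :
    (s.take b).sum ≤ (s.take a).sum := by
  induction b, hab using Nat.le_induction with
  | base => exact le_rfl
  | succ b hab ih =>
    have hb' : b < s.length := by omega
    rw [List.sum_take_succ s b hb']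
    have h0 : s[b] ≤ 0 := hneg b hb' hab (by omega)
    have hih := ih (by omega) (fun i hi hai hib => hneg i hi hai (by omega))
    omega

-- on a sorted list the first k elements are the cheapest window of length k
lemma pvShift (s : List Int)
    (hmono : ∀ (p r : Nat) (_ : p ≤ r) (hr : r < s.length), s[p] ≤ s[r])
    (l k : Nat) (h : l + k ≤ s.length) :
    (s.take k).sum ≤ (s.take (l + k)).sum - (s.take l).sum := by
  induction k with
  | zero => simp
  | succ k ih =>
    have hk1 : k < s.length := by omega
    have hlk : l + k < s.length := by omega
    have he : l + (k + 1) = (l + k) + 1 := by omega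
    rw [List.sum_take_succ s k hk1, he, List.sum_take_succ s (l + k) hlk]
    have h1 := hmono k (l + k) (by omega) hlk
    have h2 := ih (by omega)
    omega

-- for q ≥ 0, feasibility of prefixes is downward closed (sortedness)
lemma pvDown (s : List Int)
    (hmono : ∀ (p r : Nat) (_ : p ≤ r) (hr : r < s.length), s[p] ≤ s[r])
    (q : Int) (hq : 0 ≤ q) (j k : Nat) (hjk : j ≤ k) (hk : k ≤ s.length)
    (hPk : (s.take k).sum ≤ q) : (s.take j).sum ≤ q := by
  by_cases hex : ∃ i, ∃ (_ : i < s.length), j ≤ i ∧ i < k ∧ s[i] < 0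
  · obtain ⟨i, hi, hji, hik, hneg⟩ := hex
    have hPj : (s.take j).sum ≤ (s.take 0).sum := by
      refine pvAnti s 0 j (by omega) (by omega) (fun i' hi' _ hij => ?_)
      have := hmono i' i (by omega) hi
      omega
    simp at hPj
    omega
  · push Not at hex
    have hPj : (s.take j).sum ≤ (s.take k).sum := by
      refine pvMono s j k hjk hk (fun i hi hji hik => ?_)
      have := hex i hi hji hik
      omega
    omega

-- the while loop stops at the first l with total ≤ q
lemma pvWhileA_spec (s : List Int) (q : Int) (T : Int) (fuel l₀ lf : Nat)
    (hl : l₀ ≤ lf) (hfn : lf ≤ s.length) (hfuel : lf - l₀ < fuel)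
    (hstop : T - (s.take lf).sum ≤ q)
    (hbefore : ∀ l, l₀ ≤ l → l < lf → q < T - (s.take l).sum) :
    pvWhileA s q fuel (T - (s.take l₀).sum) l₀ = (T - (s.take lf).sum, lf) := by
  induction fuel generalizing l₀ with
  | zero => omega
  | succ fuel ih =>
    by_cases hE : l₀ = lf
    · subst hE
      simp only [pvWhileA, if_neg (by omega : ¬ q < T - (s.take l₀).sum)]
    · have hlt : l₀ < lf := by omega
      have hq' : q < T - (s.take l₀).sum := hbefore l₀ le_rfl hlt
      have hl₀ : l₀ < s.length := by omega
      simp only [pvWhileA, if_pos hq', PySem.List.pyGet?_ofNat s l₀ hl₀]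
      have harg : T - (s.take l₀).sum - s[l₀] = T - (s.take (l₀ + 1)).sum := by
        rw [List.sum_take_succ s l₀ hl₀]; ring
      rw [harg]
      exact ih (l₀ + 1) (by omega) (by omega) (fun l hl hlf => hbefore l (by omega) hlf)

-- A's inner loop computes pvK
lemma pvInnerA_eq (s : List Int) (q : Int)
    (hmono : ∀ (p r : Nat) (_ : p ≤ r) (hr : r < s.length), s[p] ≤ s[r])
    (hPre : 0 ≤ q ∨ ∀ k, 1 ≤ k → k ≤ s.length → (s.take k).sum ≤ q) :
    pvInnerA s q = (pvK s q : Int) := by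
  have hKn : pvK s q ≤ s.length := Nat.findGreatest_le s.length
  have hKq : ∀ j, 1 ≤ j → j ≤ pvK s q → (s.take j).sum ≤ q := by
    intro j h1 hjK
    rcases hPre with hq0 | hall
    · have hPK : (s.take (pvK s q)).sum ≤ q := by
        have h0 : (fun k => (List.take k s).sum ≤ q) 0 := by simpa using hq0
        have hfg := Nat.findGreatest_spec (P := fun k => (List.take k s).sum ≤ q)
          (Nat.zero_le s.length) h0
        simpa [pvK] using hfg
      exact pvDown s hmono q hq0 j (pvK s q) hjK hKn hPK
    · exact hall j h1 (by omega)
  have hKmax : ∀ k, k ≤ s.length → (s.take k).sum ≤ q → k ≤ pvK s q :=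
    fun k hk hPk => Nat.le_findGreatest hk hPk
  have main : ∀ c, c ≤ s.length → ∃ l, l ≤ c ∧ (c ≤ pvK s q → l = 0) ∧
      (PySem.List.pyRange 0 (c : Int) 1).foldl (pvStepA s q) (0, 0, 0)
        = (l, (s.take c).sum - (s.take l).sum, ((min c (pvK s q) : Nat) : Int)) := by
    intro c
    induction c with
    | zero =>
      intro _
      refine ⟨0, le_rfl, fun _ => rfl, ?_⟩
      simp
    | succ c ih =>
      intro hc1
      obtain ⟨l, hlc, hl0, heq⟩ := ih (by omega)
      have hcn : c < s.length := by omega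
      have hr : PySem.List.pyRange 0 ((c + 1 : Nat) : Int) 1
          = PySem.List.pyRange 0 (c : Int) 1 ++ [(c : Int)] := by
        push_cast
        exact PySem.List.pyRange_one_succ_right (by positivity)
      rw [hr, List.foldl_append, heq, List.foldl_cons, List.foldl_nil]
      have hget : PySem.List.pyGetD s ((c : Nat) : Int) 0 = s[c] := by
        rw [PySem.List.pyGetD_eq_getElem s 0 (by positivity) (by exact_mod_cast hcn)]
        simp
      have hcK_right : (∀ k, 1 ≤ k → k ≤ s.length → (s.take k).sum ≤ q) → c ≤ pvK s q := by
        intro hall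
        rcases Nat.eq_zero_or_pos c with h | h
        · omega
        · exact hKmax c (by omega) (hall c h (by omega))
      have hex : ∃ m', l ≤ m' ∧ (s.take (c + 1)).sum - (s.take m').sum ≤ q := by
        rcases hPre with hq0 | hall
        · refine ⟨c + 1, by omega, ?_⟩
          rw [sub_self]
          exact hq0
        · have hl00 : l = 0 := hl0 (hcK_right hall)
          refine ⟨0, by omega, ?_⟩
          simpa using hall (c + 1) (by omega) (by omega)
      obtain ⟨hlLF, hLFstop⟩ := Nat.find_spec hex
      have hLFle : Nat.find hex ≤ c + 1 := by
        rcases hPre with hq0 | hall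
        · refine Nat.find_min' hex ⟨by omega, ?_⟩
          rw [sub_self]
          exact hq0
        · have hl00 : l = 0 := hl0 (hcK_right hall)
          have h0 : Nat.find hex ≤ 0 := by
            refine Nat.find_min' hex ⟨by omega, ?_⟩
            simpa using hall (c + 1) (by omega) (by omega)
          omega
      have hbef : ∀ l', l ≤ l' → l' < Nat.find hex → q < (s.take (c + 1)).sum - (s.take l').sum := by
        intro l' hll' hl'LF
        have hmin := Nat.find_min hex hl'LF
        simp only [not_and, not_le] at hmin
        exact hmin hll'
      have harg : (s.take c).sum - (s.take l).sum + s[c] = (s.take (c + 1)).sum - (s.take l).sum := by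
        rw [List.sum_take_succ s c hcn]; ring
      have hwhile := pvWhileA_spec s q ((s.take (c + 1)).sum) (s.length + 1) l (Nat.find hex)
        hlLF (by omega) (by omega) hLFstop hbef
      refine ⟨Nat.find hex, hLFle, ?_, ?_⟩
      · intro hc1K
        have hl00 : l = 0 := hl0 (by omega)
        have h0 : Nat.find hex ≤ 0 := by
          refine Nat.find_min' hex ⟨by omega, ?_⟩
          simpa using hKq (c + 1) (by omega) hc1K
        omega
      · show pvStepA s q (l, (s.take c).sum - (s.take l).sum, ((min c (pvK s q) : Nat) : Int)) ((c : Nat) : Int) = _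
        unfold pvStepA
        simp only [hget, harg, hwhile]
        refine Prod.ext rfl (Prod.ext rfl ?_)
        show max ((min c (pvK s q) : Nat) : Int) (((c : Nat) : Int) - ((Nat.find hex : Nat) : Int) + 1)
            = ((min (c + 1) (pvK s q) : Nat) : Int)
        by_cases hcK : c + 1 ≤ pvK s q
        · have hl00 : l = 0 := hl0 (by omega)
          have h0 : Nat.find hex ≤ 0 := by
            refine Nat.find_min' hex ⟨by omega, ?_⟩
            simpa using hKq (c + 1) (by omega) hcK
          omega
        · have hrec : c + 1 - Nat.find hex ≤ pvK s q := by
            apply hKmax _ (by omega)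
            have hsplit : Nat.find hex + (c + 1 - Nat.find hex) = c + 1 := by omega
            have hsh := pvShift s hmono (Nat.find hex) (c + 1 - Nat.find hex) (by omega)
            rw [hsplit] at hsh
            omega
          omega
  obtain ⟨l, _, _, heq⟩ := main s.length le_rfl
  unfold pvInnerA
  rw [heq]
  simp [min_eq_right hKn]

-- B's prefix list is the list of prefix sums
lemma pvPrefixB_aux (s : List Int) : ∀ (acc : List Int) (a : Int),
    s.foldl (fun p x => p ++ [PySem.List.pyGetD p (-1) 0 + x]) (acc ++ [a]) =
      acc ++ (List.range (s.length + 1)).map (fun k => a + (s.take k).sum) := by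
  induction s with
  | nil => intro acc a; simp
  | cons x xs ih =>
    intro acc a
    rw [List.foldl_cons, PySem.List.pyGetD_neg_one_append_singleton, ih (acc ++ [a]) (a + x)]
    have hmap : (List.range ((x :: xs).length + 1)).map (fun k => a + (((x :: xs).take k).sum)) =
        a :: (List.range (xs.length + 1)).map (fun k => a + x + ((xs.take k).sum)) := by
      rw [List.length_cons, List.range_succ_eq_map, List.map_cons, List.map_map]
      simp [Function.comp_def, add_assoc]
    rw [hmap]
    simp

lemma pvPrefixB_eq (s : List Int) :
    pvPrefixB s = (List.range (s.length + 1)).map (fun k => (s.take k).sum) := by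
  have h := pvPrefixB_aux s [] 0
  simpa [pvPrefixB] using h

-- B's per-query step appends pvK
lemma pvQueryB_eq (s : List Int) (q : Int) (hpw : List.Pairwise (· ≤ ·) s)
    (res : List Int) :
    pvQueryB (PySem.List.bisectLeft s 0)
      (PySem.List.slice (pvPrefixB s) (some ((PySem.List.bisectLeft s 0 : Nat) : Int)) none)
      res q = res ++ [((pvK s q : Nat) : Int)] := by
  have hmono : ∀ (p r : Nat) (_ : p ≤ r) (hr : r < s.length), s[p] ≤ s[r] := by
    intro p r hpr hr
    rcases eq_or_lt_of_le hpr with h | h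
    · subst h; exact le_rfl
    · exact List.pairwise_iff_getElem.mp hpw p r (by omega) hr h
  obtain ⟨hmn, hlt0, hge0⟩ := PySem.List.bisectLeft_spec s 0 hpw
  have hslice : PySem.List.slice (pvPrefixB s) (some ((PySem.List.bisectLeft s 0 : Nat) : Int)) none
      = ((List.range (s.length + 1)).map (fun k => (s.take k).sum)).drop (PySem.List.bisectLeft s 0) := by
    rw [PySem.List.slice_from _ (by positivity), pvPrefixB_eq]
    simp
  rw [hslice]
  have hlen : (((List.range (s.length + 1)).map (fun k => (s.take k).sum)).drop (PySem.List.bisectLeft s 0)).length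
      = s.length + 1 - PySem.List.bisectLeft s 0 := by
    simp
  have hidx : ∀ j (hj : j < s.length + 1 - PySem.List.bisectLeft s 0),
      (((List.range (s.length + 1)).map (fun k => (s.take k).sum)).drop (PySem.List.bisectLeft s 0))[j]'(by omega) 
        = (s.take (PySem.List.bisectLeft s 0 + j)).sum := by
    intro j hj
    simp
  have h0lt : 0 < s.length + 1 - PySem.List.bisectLeft s 0 := by omega
  have hget0 : PySem.List.pyGet? (((List.range (s.length + 1)).map (fun k => (s.take k).sum)).drop (PySem.List.bisectLeft s 0)) 0
      = some ((s.take (PySem.List.bisectLeft s 0)).sum) := by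
    have h := PySem.List.pyGet?_ofNat (((List.range (s.length + 1)).map (fun k => (s.take k).sum)).drop (PySem.List.bisectLeft s 0)) 0 (by omega)
    rw [show (((0:Nat)):Int) = 0 from rfl] at h
    rw [h]
    have h00 := hidx 0 h0lt
    simp only [Nat.add_zero] at h00
    rw [h00]
  have hincpw : List.Pairwise (· ≤ ·) (((List.range (s.length + 1)).map (fun k => (s.take k).sum)).drop (PySem.List.bisectLeft s 0)) := by
    apply List.pairwise_iff_getElem.mpr
    intro i j hi hj hij
    rw [hidx i (by omega), hidx j (by omega)]
    exact pvMono s (PySem.List.bisectLeft s 0 + i) (PySem.List.bisectLeft s 0 + j)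
      (by omega) (by omega) (fun t ht hmt _ => hge0 t ht (by omega))
  unfold pvQueryB
  rw [hget0]
  dsimp only
  by_cases hq : q < (s.take (PySem.List.bisectLeft s 0)).sum
  · rw [if_pos hq]
    have hPmmin : ∀ k, k ≤ s.length → (s.take (PySem.List.bisectLeft s 0)).sum ≤ (s.take k).sum := by
      intro k hkn
      rcases Nat.lt_or_ge k (PySem.List.bisectLeft s 0) with h | h
      · exact pvAnti s k (PySem.List.bisectLeft s 0) (by omega) hmn
          (fun i hi hki him => le_of_lt (hlt0 i hi him))
      · exact pvMono s (PySem.List.bisectLeft s 0) k h hkn (fun i hi hmi _ => hge0 i hi hmi)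
    have hK0 : pvK s q = 0 := by
      unfold pvK
      rw [Nat.findGreatest_eq_zero_iff]
      intro k hkpos hkn hPk
      have := hPmmin k hkn
      omega
    rw [hK0]
    rfl
  · rw [if_neg hq]
    obtain ⟨htlen, hle, hgt⟩ := PySem.List.bisectRight_spec _ q hincpw
    rw [hlen] at htlen
    have ht1 : 1 ≤ PySem.List.bisectRight (((List.range (s.length + 1)).map (fun k => (s.take k).sum)).drop (PySem.List.bisectLeft s 0)) q := by
      by_contra hc
      have h0 := hgt 0 (by rw [hlen]; omega) (by omega)
      rw [hidx 0 h0lt] at h0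
      simp at h0
      omega
    set m := PySem.List.bisectLeft s 0 with hmdef
    set t := PySem.List.bisectRight (((List.range (s.length + 1)).map (fun k => (s.take k).sum)).drop m) q with htdef
    have hub : ∀ k, m + t - 1 < k → k ≤ s.length → ¬((s.take k).sum ≤ q) := by
      intro k hk hkn hPk
      have hj : k - m < s.length + 1 - m := by omega
      have h := hgt (k - m) (by rw [hlen]; omega) (by omega)
      rw [hidx (k - m) hj, show m + (k - m) = k from by omega] at h
      omega
    have hlb : (s.take (m + t - 1)).sum ≤ q := by
      have hj : t - 1 < s.length + 1 - m := by omega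
      have h := hle (t - 1) (by rw [hlen]; omega) (by omega)
      rwa [hidx (t - 1) hj, show m + (t - 1) = m + t - 1 from by omega] at h
    have h1 : m + t - 1 ≤ pvK s q := Nat.le_findGreatest (by omega) hlb
    have h2 : pvK s q ≤ m + t - 1 := by
      by_contra hc
      push Not at hc
      have hPK : (s.take (pvK s q)).sum ≤ q := by
        have hfg := Nat.findGreatest_spec (P := fun k => (List.take k s).sum ≤ q)
          (m := m + t - 1) (n := s.length) (by omega) hlb
        simpa [pvK] using hfg
      exact hub (pvK s q) (by omega) (Nat.findGreatest_le s.length) hPK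
    have hval : ((pvK s q : Nat) : Int) = (m : Int) + (t : Int) - 1 := by omega
    rw [hval]

-- folding B's per-query step over the queries
lemma pvFoldB_eq (s : List Int) (hpw : List.Pairwise (· ≤ ·) s) (queries res : List Int) :
    queries.foldl (pvQueryB (PySem.List.bisectLeft s 0)
      (PySem.List.slice (pvPrefixB s) (some ((PySem.List.bisectLeft s 0 : Nat) : Int)) none)) res
      = res ++ queries.map (fun q => ((pvK s q : Nat) : Int)) := by
  induction queries generalizing res with
  | nil => simp
  | cons q qs ih =>
    rw [List.foldl_cons, pvQueryB_eq s q hpw res, ih (res ++ [((pvK s q : Nat) : Int)])]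
    simp

-- ===== VERDICT (by name: the statement is the Claim_ definition above) =====
theorem answerQueries_spec : Claim_equal_answerQueries := by
  intro nums queries _ hPre
  unfold Spec_answerQueries
  simp only [answerQueries, answerQueries_alt]
  have hpw : List.Pairwise (· ≤ ·) (PySem.List.sorted nums (fun x => x)) :=
    PySem.List.sorted_pairwise nums (fun x => x)
  have hmono : ∀ (p r : Nat) (_ : p ≤ r) (hr : r < (PySem.List.sorted nums (fun x => x)).length),
      (PySem.List.sorted nums (fun x => x))[p] ≤ (PySem.List.sorted nums (fun x => x))[r] :=
    fun p r hpr hr => PySem.List.sorted_id_getElem_mono nums hpr hr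
  rw [PySem.List.foldl_append_singleton_eq_map
    (fun i => pvInnerA (PySem.List.sorted nums (fun x => x)) (PySem.List.pyGetD queries i 0)),
    pvFoldB_eq (PySem.List.sorted nums (fun x => x)) hpw queries []]
  rw [show (fun i => pvInnerA (PySem.List.sorted nums (fun x => x)) (PySem.List.pyGetD queries i 0))
      = (pvInnerA (PySem.List.sorted nums (fun x => x))) ∘ (fun i => PySem.List.pyGetD queries i 0)
    from rfl, ← List.map_map]
  have hmp : List.map (fun i => PySem.List.pyGetD queries i 0)
      (PySem.List.pyRange 0 ((queries.length : Int))) = queries :=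
    PySem.List.map_pyGetD_pyRange_zero queries 0
  rw [hmp]
  simp only [List.nil_append]
  refine List.map_congr_left (fun q hq => ?_)
  refine pvInnerA_eq (PySem.List.sorted nums (fun x => x)) q hmono ?_
  rcases hPre q hq with h | h
  · exact Or.inl h
  · refine Or.inr (fun k h1 hk => ?_)
    have hlen : (PySem.List.sorted nums (fun x => x)).length = nums.length :=
      PySem.List.length_sorted nums (fun x => x) false
    have := h (k - 1) (by omega)
    rwa [show k - 1 + 1 = k from by omega] at this
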